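-- pv_equiv track=rewrite | github.com/bayani482/Cecs277 | Lab_3/Lab3.py | get_letters_remaining
-- ===== SOURCE A (Python) =====
-- def get_letters_remaining(incorrect, correct):
--     """
--         Function that iterates through both "incorrect" and "correct" lists, finding and removing their elements from the "alpha" (Alphabet) list.
--         INPUT: incorrect, correct (Lists)
--         OUTPUT: alpha (list)
--     """
--     alpha = ['A', 'B', 'C', 'D', 'E', 'F', 'G', 'H', 'I', 'J', 'K', 'L', 'M', 'N', 'O', 'P', 'Q', 'R', 'S', 'T', 'U', 'V', 'W', 'X', 'Y', 'Z']
--     for letter in incorrect: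
--         if letter in alpha:
--             alpha.remove(letter)
--     for letter in correct:
--         if letter in alpha:
--             alpha.remove(letter)
--     return alpha
-- ===== SOURCE B (Python) =====
-- def get_letters_remaining(incorrect, correct):
--     """Idiomatic rewrite: build the set of used letters once, then filter the fixed alphabet."""
--     used = set(incorrect) | set(correct)
--     alpha = ['A', 'B', 'C', 'D', 'E', 'F', 'G', 'H', 'I', 'J', 'K', 'L', 'M',
--              'N', 'O', 'P', 'Q', 'R', 'S', 'T', 'U', 'V', 'W', 'X', 'Y', 'Z']
--     return [c for c in alpha if c not in used]
-- ===== Notes on version B (the rewrite author's own statement) =====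
-- stated objective: faster
-- what changed: B builds a set of used letters once and filters the fixed alphabet with a single comprehension, instead of A's per-input-element membership-test-and-remove mutation of the alphabet list.
import Mathlib
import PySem

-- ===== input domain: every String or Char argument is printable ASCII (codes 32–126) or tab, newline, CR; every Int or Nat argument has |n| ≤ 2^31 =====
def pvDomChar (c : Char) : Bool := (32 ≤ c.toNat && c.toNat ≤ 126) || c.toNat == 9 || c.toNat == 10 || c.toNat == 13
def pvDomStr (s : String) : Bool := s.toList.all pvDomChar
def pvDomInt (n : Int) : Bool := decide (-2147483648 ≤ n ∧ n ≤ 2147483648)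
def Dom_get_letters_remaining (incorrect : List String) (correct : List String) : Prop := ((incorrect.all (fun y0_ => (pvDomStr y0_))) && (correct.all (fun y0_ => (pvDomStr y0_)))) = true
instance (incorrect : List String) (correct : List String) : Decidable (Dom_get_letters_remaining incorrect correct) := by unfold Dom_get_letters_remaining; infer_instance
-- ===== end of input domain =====

-- B rebuilds the result idiomatically: one set of used letters, one filter over the fixed alphabet,
-- instead of A's per-element membership-test-and-remove mutation of the alphabet list.


-- the fixed alphabet literal both Pythons contain
def pvAlpha : List String :=
  ["A", "B", "C", "D", "E", "F", "G", "H", "I", "J", "K", "L", "M",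
   "N", "O", "P", "Q", "R", "S", "T", "U", "V", "W", "X", "Y", "Z"]

-- ===== PORT A =====
-- 'if letter in alpha: alpha.remove(letter)' — Python list.remove deletes the first occurrence
def pvRemoveStep (alpha : List String) (letter : String) : List String :=
  if letter ∈ alpha then alpha.erase letter else alpha

def get_letters_remaining (incorrect : List String) (correct : List String) : List String :=
  let alpha := pvAlpha
  let alpha := incorrect.foldl pvRemoveStep alpha
  let alpha := correct.foldl pvRemoveStep alpha
  alpha

-- ===== PORT B =====
-- used = set(incorrect) | set(correct); [c for c in alpha if c not in used]
def get_letters_remaining_alt (incorrect : List String) (correct : List String) : List String :=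
  let used : PySem.Set String := PySem.Set.union (PySem.Set.ofList incorrect) (PySem.Set.ofList correct)
  pvAlpha.filter (fun c => !(PySem.Set.contains used c))

-- ===== PRECONDITION & SPEC =====
def Spec_get_letters_remaining (incorrect : List String) (correct : List String) (out : List String) : Prop := out = get_letters_remaining_alt incorrect correct
instance (incorrect : List String) (correct : List String) (out : List String) : Decidable (Spec_get_letters_remaining incorrect correct out) := by unfold Spec_get_letters_remaining; infer_instance

-- ===== CLAIM (what is proved, stated in full; the proofs are below) =====
def Claim_equal_get_letters_remaining : Prop := ∀ (incorrect : List String) (correct : List String), Dom_get_letters_remaining incorrect correct → Spec_get_letters_remaining incorrect correct (get_letters_remaining incorrect correct)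

-- ===== LEMMAS AND PROOFS =====

-- on a duplicate-free list, one remove step is a filter
theorem pvRemoveStep_eq_filter (al : List String) (x : String) (h : al.Nodup) :
    pvRemoveStep al x = al.filter (fun c => !(c == x)) := by
  unfold pvRemoveStep
  split_ifs with hx
  · rw [List.Nodup.erase_eq_filter h]
    rfl
  · symm
    apply List.filter_eq_self.2
    intro c hc
    simp only [Bool.not_eq_eq_eq_not, Bool.not_true, beq_eq_false_iff_ne, ne_eq]
    exact fun e => hx (e ▸ hc)

-- folding the remove step over xs filters out every element of xs
theorem pvFoldl_removeStep (xs : List String) (al : List String) (h : al.Nodup) :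
    xs.foldl pvRemoveStep al = al.filter (fun c => !(xs.contains c)) := by
  induction xs generalizing al with
  | nil => simp
  | cons x xs ih =>
    have hstep : pvRemoveStep al x = al.filter (fun c => !(c == x)) :=
      pvRemoveStep_eq_filter al x h
    have hnd : (pvRemoveStep al x).Nodup := hstep ▸ h.filter _
    rw [List.foldl_cons, ih _ hnd, hstep, List.filter_filter]
    apply List.filter_congr
    intro c _
    by_cases hcx : c = x <;> simp [hcx]

theorem pvAlpha_nodup : pvAlpha.Nodup := by decide

theorem get_letters_remaining_eq (incorrect correct : List String) :
    get_letters_remaining incorrect correct = get_letters_remaining_alt incorrect correct := by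
  show correct.foldl pvRemoveStep (incorrect.foldl pvRemoveStep pvAlpha) =
    pvAlpha.filter (fun c => !(PySem.Set.contains (PySem.Set.union (PySem.Set.ofList incorrect) (PySem.Set.ofList correct)) c))
  have h1 := pvFoldl_removeStep incorrect pvAlpha pvAlpha_nodup
  have hnd1 : (incorrect.foldl pvRemoveStep pvAlpha).Nodup := h1 ▸ pvAlpha_nodup.filter _
  have h2 := pvFoldl_removeStep correct _ hnd1
  rw [h2, h1, List.filter_filter]
  apply List.filter_congr
  intro c _
  simp [PySem.Set.contains, PySem.Set.union, pysem]
  exact Bool.and_comm ..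

-- ===== VERDICT (by name: the statement is the Claim_ definition above) =====
theorem get_letters_remaining_spec : Claim_equal_get_letters_remaining := by
  intro incorrect correct _
  unfold Spec_get_letters_remaining
  exact get_letters_remaining_eq incorrect correct
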